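-- pv_equiv track=rewrite | github.com/Zeydel/Everybody-Codes | The Song of Ducks and Dragons/Quest06/Quest06_part3.py | get_possible_mentor_combinations
-- ===== SOURCE A (Python) =====
-- import math
--
-- def get_possible_mentor_combinations(people, max_distance, repeats):
--
--     # Init mentor count
--     mentor_combinations = 0
--
--     # Find out how many 'blocks' of people that we have to process manually
--     manual_scans = math.ceil(max_distance / len(people))
--
--     # Init dictionary of seen mentors
--     seen_mentors = dict()
--
--     # For every person in the manually proccessed blocks
--     for i in range(len(people) * manual_scans):
--
--         # Get the character
--         character = people[i % len(people)]
--
--         # If it is a mentor, add its index to the list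
--         if character.isupper():
--
--             if character not in seen_mentors:
--                 seen_mentors[character] = []
--
--             seen_mentors[character].append(i)
--
--         # If it is a mentee, and we have seen any mentors for it
--         elif character.islower() and character.upper() in seen_mentors:
--
--             # Go through mentors of the same type
--             for mentor in seen_mentors[character.upper()]:
--
--                 # If it is within distance, add one to mentor count
--                 if i - mentor <= max_distance:
--                     mentor_combinations += 1
--
--     # Find out how many blocks of people we have left after manual processing
--     remaining_repetitions = repeats - manual_scans
--
--     # Get start index of the remaining blocks
--     start_index = len(people) * manual_scans
--
--     # Init count of mentors in the block as zero
--     block_mentors = 0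
--
--     # For every person in the block
--     for i in range(start_index, len(people) + start_index):
--
--         # Get the character
--         character = people[i % len(people)]
--
--         # If mentor, add to list
--         if character.isupper():
--
--             if character not in seen_mentors:
--                 seen_mentors[character] = []
--
--             seen_mentors[character].append(i)
--
--         # If mentee, increment for mentors within range
--         elif character.islower() and character.upper() in seen_mentors:
--
--             for mentor in seen_mentors[character.upper()]:
--
--                 if i - mentor <= max_distance:
--                     block_mentors += 1
--
--     # Add the number of mentors in the block, multiplied by the remaining blocks
--     mentor_combinations += (block_mentors * remaining_repetitions)
--
--     return mentor_combinations
-- ===== SOURCE B (Python) =====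
-- from bisect import bisect_left
--
--
-- def get_possible_mentor_combinations(people, max_distance, repeats):
--     # Count mentor-mentee pairs within max_distance across the repeated sequence.
--     # Scans block by block and counts in-range mentors with one binary search on the
--     # (sorted) per-letter mentor index list instead of scanning the whole list.
--     length = len(people)
--     manual_scans = -(-max_distance // length)  # exact integer ceil(max_distance / length)
--     seen = {}
--     total = 0
--
--     def visit(i, ch, acc):
--         if ch.isupper():
--             seen.setdefault(ch, []).append(i)
--         elif ch.islower():
--             lst = seen.get(ch.upper())
--             if lst is not None:
--                 acc += len(lst) - bisect_left(lst, i - max_distance)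
--         return acc
--
--     for b in range(manual_scans):
--         for i, ch in enumerate(people, b * length):
--             total = visit(i, ch, total)
--
--     start = length * manual_scans
--     block = 0
--     for i, ch in enumerate(people, start):
--         block = visit(i, ch, block)
--
--     return total + block * (repeats - manual_scans)
-- ===== Notes on version B (the rewrite author's own statement) =====
-- stated objective: alternative
-- what changed: B replaces A's inner scan over all previously seen mentors of a letter by a single binary search (bisect_left) on the per-letter mentor index list, which is sorted by construction, and walks the repetitions block by block with enumerate instead of one flat index loop with i % len; the float-based math.ceil(max_distance/len) becomes exact integer ceiling division.
import Mathlib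
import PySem

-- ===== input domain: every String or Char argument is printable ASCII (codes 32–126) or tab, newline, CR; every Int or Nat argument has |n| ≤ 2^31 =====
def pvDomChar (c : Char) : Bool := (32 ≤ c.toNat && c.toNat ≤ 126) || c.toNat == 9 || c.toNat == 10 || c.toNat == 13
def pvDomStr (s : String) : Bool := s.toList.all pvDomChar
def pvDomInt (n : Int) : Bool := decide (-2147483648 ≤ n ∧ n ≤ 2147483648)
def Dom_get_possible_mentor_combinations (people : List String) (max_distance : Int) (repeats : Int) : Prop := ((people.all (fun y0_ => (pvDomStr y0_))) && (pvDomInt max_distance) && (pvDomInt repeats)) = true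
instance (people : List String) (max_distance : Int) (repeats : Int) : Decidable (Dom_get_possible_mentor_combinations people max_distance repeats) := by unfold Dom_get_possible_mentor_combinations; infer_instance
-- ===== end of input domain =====

-- B counts in-range mentors with one binary search on the sorted per-letter mentor index
-- list (and walks the repetitions block by block) instead of A's linear scan over all
-- previously seen mentors at every mentee; objective: alternative algorithm, same result.


-- ===== PORT A =====
-- Python str.isupper()/str.islower(), exact on ASCII strings: at least one cased
-- character, and no cased character of the other case (ASCII cased = letters).
def pvIsupperStr (s : String) : Bool :=
  s.toList.any PySem.Str.isupper && s.toList.all (fun c => !PySem.Str.islower c)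

def pvIslowerStr (s : String) : Bool :=
  s.toList.any PySem.Str.islower && s.toList.all (fun c => !PySem.Str.isupper c)

-- one iteration of A's (textually identical) loop bodies: state = (seen_mentors, counter)
def pvAStep (people : List String) (max_distance : Int)
    (st : PySem.Dict String (List Int) × Int) (i : Int) :
    PySem.Dict String (List Int) × Int :=
  let character := PySem.List.pyGetD people (PySem.Int.mod i (people.length : Int)) ""
  if pvIsupperStr character then
    -- if character not in seen_mentors: seen_mentors[character] = []  ; then .append(i)
    let d := if st.1.contains character then st.1 else st.1.insert character []
    (d.modify character [] (fun l => l ++ [i]), st.2)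
  else if pvIslowerStr character && st.1.contains (PySem.Str.upper character) then
    (st.1, (st.1.getD (PySem.Str.upper character) []).foldl
      (fun acc mentor => if i - mentor ≤ max_distance then acc + 1 else acc) st.2)
  else st

def get_possible_mentor_combinations (people : List String) (max_distance : Int) (repeats : Int) : Int :=
  -- math.ceil(max_distance / len(people)): ported as exact integer ceiling division,
  -- equal to CPython's float-division ceil for |max_distance| ≤ 2^31 and len ≥ 1
  -- (the float quotient error is far below the distance to the next integer there).
  let manual_scans := -(PySem.Int.floordiv (-max_distance) (people.length : Int))
  let st1 := (PySem.List.pyRange 0 ((people.length : Int) * manual_scans) 1).foldl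
      (pvAStep people max_distance) (PySem.Dict.empty, 0)
  let remaining_repetitions := repeats - manual_scans
  let start_index := (people.length : Int) * manual_scans
  let st2 := (PySem.List.pyRange start_index ((people.length : Int) + start_index) 1).foldl
      (pvAStep people max_distance) (st1.1, 0)
  st1.2 + st2.2 * remaining_repetitions

-- ===== PORT B =====
-- one visit of B: setdefault-append for mentors, bisect_left count for mentees
def pvVisit (max_distance : Int) (st : PySem.Dict String (List Int) × Int)
    (p : Int × String) : PySem.Dict String (List Int) × Int :=
  if pvIsupperStr p.2 then
    ((st.1.setdefault p.2 []).modify p.2 [] (fun l => l ++ [p.1]), st.2)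
  else if pvIslowerStr p.2 then
    match st.1.get? (PySem.Str.upper p.2) with
    | some lst => (st.1, st.2 + ((lst.length : Int) - (PySem.List.bisectLeft lst (p.1 - max_distance) : Int)))
    | none => st
  else st

def get_possible_mentor_combinations_alt (people : List String) (max_distance : Int) (repeats : Int) : Int :=
  let length := (people.length : Int)
  let manual_scans := -(PySem.Int.floordiv (-max_distance) length)  -- exact integer ceil
  let st1 := (PySem.List.pyRange 0 manual_scans 1).foldl
      (fun st b => (PySem.List.enumerate people (b * length)).foldl (pvVisit max_distance) st)
      (PySem.Dict.empty, 0)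
  let start := length * manual_scans
  let st2 := (PySem.List.enumerate people start).foldl (pvVisit max_distance) (st1.1, 0)
  st1.2 + st2.2 * (repeats - manual_scans)

-- ===== PRECONDITION & SPEC =====
-- Pre_ excludes exactly people = [], where A raises ZeroDivisionError (len(people) divides).
def Pre_get_possible_mentor_combinations (people : List String) (max_distance : Int) (repeats : Int) : Prop :=
  people ≠ []
instance (people : List String) (max_distance : Int) (repeats : Int) : Decidable (Pre_get_possible_mentor_combinations people max_distance repeats) := by unfold Pre_get_possible_mentor_combinations; infer_instance

def pvWitness_get_possible_mentor_combinations : List String × Int × Int := (["A", "b", "a"], 3, 5)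

def Spec_get_possible_mentor_combinations (people : List String) (max_distance : Int) (repeats : Int) (out : Int) : Prop := out = get_possible_mentor_combinations_alt people max_distance repeats
instance (people : List String) (max_distance : Int) (repeats : Int) (out : Int) : Decidable (Spec_get_possible_mentor_combinations people max_distance repeats out) := by unfold Spec_get_possible_mentor_combinations; infer_instance

-- ===== CLAIM (what is proved, stated in full; the proofs are below) =====
def Claim_equal_get_possible_mentor_combinations : Prop := ∀ (people : List String) (max_distance : Int) (repeats : Int), Dom_get_possible_mentor_combinations people max_distance repeats → Pre_get_possible_mentor_combinations people max_distance repeats → Spec_get_possible_mentor_combinations people max_distance repeats (get_possible_mentor_combinations people max_distance repeats)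

-- ===== LEMMAS AND PROOFS =====

-- every per-letter mentor list in the dict is sorted and below the next index lo
def pvInv (d : PySem.Dict String (List Int)) (lo : Int) : Prop :=
  ∀ k : String, (d.getD k []).Pairwise (· ≤ ·) ∧ ∀ m ∈ d.getD k [], m < lo

theorem pvInv_empty (lo : Int) : pvInv PySem.Dict.empty lo := by
  intro k
  simp [PySem.Dict.getD, PySem.Dict.get?, PySem.Dict.empty]

-- on a sorted list, the number of elements ≥ x is length - bisect_left x
theorem pv_count_bisect (l : List Int) (x : Int) (hs : l.Pairwise (· ≤ ·)) :
    (l.countP (fun m => decide (x ≤ m)) : Int)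
      = (l.length : Int) - (PySem.List.bisectLeft l x : Int) := by
  obtain ⟨hle, hlt, hge⟩ := PySem.List.bisectLeft_spec l x hs
  set b := PySem.List.bisectLeft l x with hb
  have hsplit : l = l.take b ++ l.drop b := (List.take_append_drop b l).symm
  have h1 : (l.take b).countP (fun m => decide (x ≤ m)) = 0 := by
    apply List.countP_eq_zero.2
    intro a ha
    obtain ⟨j, hj, rfl⟩ := List.mem_iff_getElem.1 ha
    have hjb : j < b := lt_of_lt_of_le hj (by rw [List.length_take]; exact min_le_left _ _)
    have hjl : j < l.length := lt_of_lt_of_le hjb hle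
    have := hlt j hjl hjb
    simp only [List.getElem_take]
    simpa using not_le.2 this
  have h2 : (l.drop b).countP (fun m => decide (x ≤ m)) = (l.drop b).length := by
    apply List.countP_eq_length.2
    intro a ha
    obtain ⟨j, hj, rfl⟩ := List.mem_iff_getElem.1 ha
    have hjl : b + j < l.length := by
      simpa [List.length_drop] using Nat.add_lt_of_lt_sub' (by simpa [List.length_drop] using hj)
    have := hge (b + j) hjl (Nat.le_add_right _ _)
    simp only [List.getElem_drop]
    simpa using this
  have : l.countP (fun m => decide (x ≤ m)) = l.length - b := by
    conv_lhs => rw [hsplit]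
    rw [List.countP_append, h1, h2]
    simp [List.length_drop]
  rw [this]
  have : b ≤ l.length := hle
  push_cast [Nat.cast_sub this]
  ring

-- the two loop bodies agree, and preserve the invariant, at any position i whose
-- character matches A's lookup people[i % len(people)]
theorem pv_step_eq (people : List String) (dmax : Int)
    (st : PySem.Dict String (List Int) × Int) (i : Int)
    (hInv : pvInv st.1 i) :
    pvAStep people dmax st i
      = pvVisit dmax st (i, PySem.List.pyGetD people (PySem.Int.mod i (people.length : Int)) "") := by
  unfold pvAStep pvVisit
  set ch := PySem.List.pyGetD people (PySem.Int.mod i (people.length : Int)) "" with hch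
  simp only
  by_cases hup : pvIsupperStr ch
  · simp only [hup, if_true]
    cases hc : st.1.contains ch
    · rw [PySem.Dict.setdefault_of_not_contains _ _ hc]
      simp
    · rw [PySem.Dict.setdefault_of_contains _ _ hc]
      simp
  · simp only [hup, if_false, Bool.false_eq_true]
    by_cases hlow : pvIslowerStr ch
    · simp only [hlow, Bool.true_and]
      cases hc : st.1.contains (PySem.Str.upper ch)
      · have hnone : st.1.get? (PySem.Str.upper ch) = none :=
          (PySem.Dict.get?_eq_none_iff_contains _ _).2 hc
        simp [hnone]
      · obtain ⟨lst, hlst⟩ : ∃ lst, st.1.get? (PySem.Str.upper ch) = some lst := by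
          cases h : st.1.get? (PySem.Str.upper ch)
          · exact absurd ((PySem.Dict.get?_eq_none_iff_contains _ _).1 h) (by simp [hc])
          · exact ⟨_, rfl⟩
        have hgetD : st.1.getD (PySem.Str.upper ch) [] = lst := by
          simp [PySem.Dict.getD, hlst]
        have hsort : lst.Pairwise (· ≤ ·) := by
          have := (hInv (PySem.Str.upper ch)).1; rwa [hgetD] at this
        simp only [hlst, if_true]
        refine Prod.ext rfl ?_
        simp only
        have hfun : (fun (acc : Int) mentor => if i - mentor ≤ dmax then acc + 1 else acc)
            = (fun (acc : Int) mentor => if (fun m => decide (i - dmax ≤ m)) mentor = true then acc + 1 else acc) := by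
          funext acc m
          by_cases h : i - m ≤ dmax
          · rw [if_pos h, if_pos (by simp; omega)]
          · rw [if_neg h, if_neg (by simp; omega)]
        rw [hgetD, hfun, PySem.List.foldl_count_if, pv_count_bisect lst (i - dmax) hsort]
    · simp [hlow]

theorem pv_step_inv (people : List String) (dmax : Int)
    (st : PySem.Dict String (List Int) × Int) (i : Int)
    (hInv : pvInv st.1 i) :
    pvInv (pvAStep people dmax st i).1 (i + 1) := by
  have hmono : pvInv st.1 (i + 1) := fun k =>
    ⟨(hInv k).1, fun m hm => lt_of_lt_of_le ((hInv k).2 m hm) (by omega)⟩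
  unfold pvAStep
  set ch := PySem.List.pyGetD people (PySem.Int.mod i (people.length : Int)) "" with hch
  simp only
  by_cases hup : pvIsupperStr ch
  · simp only [hup, if_true]
    set d1 := if st.1.contains ch then st.1 else st.1.insert ch [] with hd1
    have hbase : ∀ k : String, d1.getD k [] = st.1.getD k [] := by
      intro k
      rw [hd1]
      cases hc : st.1.contains ch
      · simp only [Bool.false_eq_true, if_false]
        by_cases hk : k = ch
        · subst hk
          have hnone : st.1.get? ch = none := (PySem.Dict.get?_eq_none_iff_contains _ _).2 hc
          simp [PySem.Dict.getD, hnone, PySem.Dict.get?_insert_self]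
        · simp [PySem.Dict.getD, PySem.Dict.get?_insert_of_ne _ _ hk]
      · simp
    intro k
    rw [PySem.Dict.getD_modify]
    by_cases hk : k = ch
    · subst hk
      rw [if_pos rfl, hbase]
      constructor
      · rw [List.pairwise_append]
        refine ⟨(hInv ch).1, List.pairwise_singleton _ _, ?_⟩
        intro a ha b hb
        rw [List.mem_singleton] at hb
        subst hb
        exact le_of_lt ((hInv ch).2 a ha)
      · intro m hm
        rcases List.mem_append.1 hm with h | h
        · exact lt_of_lt_of_le ((hInv ch).2 m h) (by omega)
        · rw [List.mem_singleton] at h; omega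
    · rw [if_neg hk, hbase]
      exact hmono k
  · simp only [hup, if_false, Bool.false_eq_true]
    by_cases hc : pvIslowerStr ch && st.1.contains (PySem.Str.upper ch)
    · simp only [hc, if_true]
      exact hmono
    · simp only [hc, if_false, Bool.false_eq_true]
      exact hmono

theorem pv_run (people : List String) (dmax : Int) :
    ∀ (n : Nat) (a : Int) (st : PySem.Dict String (List Int) × Int), pvInv st.1 a →
    ((PySem.List.pyRange a (a + n) 1).foldl (pvAStep people dmax) st
        = ((PySem.List.pyRange a (a + n) 1).map
            (fun i => (i, PySem.List.pyGetD people (PySem.Int.mod i (people.length : Int)) ""))).foldl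
            (pvVisit dmax) st)
      ∧ pvInv ((PySem.List.pyRange a (a + n) 1).foldl (pvAStep people dmax) st).1 (a + n) := by
  intro n
  induction n with
  | zero =>
    intro a st hInv
    simp [PySem.List.pyRange_one_eq_nil (le_refl a), hInv]
  | succ n ih =>
    intro a st hInv
    have hcons : PySem.List.pyRange a (a + (n + 1 : Nat)) 1 = a :: PySem.List.pyRange (a + 1) (a + (n + 1 : Nat)) 1 :=
      PySem.List.pyRange_one_cons (by push_cast; omega)
    have harg : a + ((n : Int) + 1) = (a + 1) + n := by ring
    rw [hcons]
    simp only [List.foldl_cons, List.map_cons]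
    rw [pv_step_eq people dmax st a hInv] at *
    have hInv' : pvInv (pvVisit dmax st (a, PySem.List.pyGetD people (PySem.Int.mod a (people.length : Int)) "")).1 (a + 1) := by
      rw [← pv_step_eq people dmax st a hInv]
      exact pv_step_inv people dmax st a hInv
    have := ih (a + 1) _ hInv'
    push_cast at this ⊢
    rw [harg]
    exact this

theorem pv_enum_block (people : List String) (hL : people ≠ []) (b : Int) :
    PySem.List.enumerate people (b * (people.length : Int))
      = (PySem.List.pyRange (b * (people.length : Int)) (b * (people.length : Int) + (people.length : Int)) 1).map
          (fun i => (i, PySem.List.pyGetD people (PySem.Int.mod i (people.length : Int)) "")) := by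
  have hLpos : (0 : Int) < (people.length : Int) := by
    have : people.length ≠ 0 := fun h => hL (List.eq_nil_of_length_eq_zero h)
    omega
  apply List.ext_getElem
  · rw [PySem.List.length_enumerate, List.length_map, PySem.List.length_pyRange_one]
    omega
  · intro j h1 h2
    have hj : j < people.length := by rwa [PySem.List.length_enumerate] at h1
    simp only [PySem.List.enumerate_eq_zipIdx_map]
    rw [List.getElem_map, List.getElem_map, PySem.List.getElem_pyRange_one]
    have hzl : j < (people.zipIdx.length) := by simpa using hj
    rw [List.getElem_zipIdx]
    have hmod : PySem.Int.mod (b * (people.length : Int) + (j : Int)) (people.length : Int) = (j : Int) := by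
      rw [PySem.Int.mod_eq_emod_of_pos hLpos]
      have hre : b * (people.length : Int) + (j : Int) = (j : Int) + (people.length : Int) * b := by ring
      rw [hre, Int.add_mul_emod_self_left]
      exact Int.emod_eq_of_lt (by positivity) (by exact_mod_cast hj)
    rw [hmod]
    have : PySem.List.pyGetD people ((j : Nat) : Int) "" = people.getD j "" :=
      PySem.List.pyGetD_natCast people j ""
    rw [this, List.getD_eq_getElem _ _ hj]
    simp

theorem pv_blocks (people : List String) (hL : people ≠ []) (dmax : Int) :
    ∀ (m : Nat),
      ((PySem.List.pyRange 0 ((people.length : Int) * m) 1).foldl (pvAStep people dmax) (PySem.Dict.empty, 0)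
        = (PySem.List.pyRange 0 (m : Int) 1).foldl
            (fun st b => (PySem.List.enumerate people (b * (people.length : Int))).foldl (pvVisit dmax) st)
            (PySem.Dict.empty, 0))
      ∧ pvInv ((PySem.List.pyRange 0 ((people.length : Int) * m) 1).foldl (pvAStep people dmax) (PySem.Dict.empty, 0)).1
          ((people.length : Int) * m) := by
  have hLpos : (0 : Int) < (people.length : Int) := by
    have : people.length ≠ 0 := fun h => hL (List.eq_nil_of_length_eq_zero h)
    omega
  intro m
  induction m with
  | zero =>
    refine ⟨?_, ?_⟩
    · norm_num [PySem.List.pyRange_one_eq_nil (le_refl (0:Int))]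
    · norm_num [PySem.List.pyRange_one_eq_nil (le_refl (0:Int))]
      exact pvInv_empty 0
  | succ m ih =>
    obtain ⟨ihEq, ihInv⟩ := ih
    set L : Int := (people.length : Int) with hdefL
    have hsplitA : PySem.List.pyRange 0 (L * ((m : Nat) + 1 : Nat)) 1
        = PySem.List.pyRange 0 (L * m) 1 ++ PySem.List.pyRange (L * m) (L * m + L) 1 := by
      have h1 : (0:Int) ≤ L * m := by positivity
      have h2 : L * m ≤ L * m + L := by omega
      have h3 : L * ((m : Nat) + 1 : Nat) = L * m + L := by push_cast; ring
      rw [h3, PySem.List.pyRange_one_append 0 (L * m) (L * m + L) h1 h2]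
    have hsplitB : PySem.List.pyRange 0 (((m : Nat) + 1 : Nat) : Int) 1
        = PySem.List.pyRange 0 (m : Int) 1 ++ [(m : Int)] := by
      push_cast
      exact PySem.List.pyRange_one_succ_right (by positivity)
    have hrun := pv_run people dmax people.length (L * m)
        ((PySem.List.pyRange 0 (L * m) 1).foldl (pvAStep people dmax) (PySem.Dict.empty, 0)) ihInv
    have henum : PySem.List.enumerate people ((m : Int) * L)
        = (PySem.List.pyRange (L * m) (L * m + L) 1).map
            (fun i => (i, PySem.List.pyGetD people (PySem.Int.mod i L) "")) := by
      have := pv_enum_block people hL (m : Int)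
      rw [mul_comm (m : Int) L] at this
      rw [mul_comm (m : Int) L]
      exact this
    constructor
    · rw [hsplitA, hsplitB, List.foldl_append, List.foldl_append, ← ihEq]
      simp only [List.foldl_cons, List.foldl_nil]
      rw [henum, ← hrun.1]
    · rw [hsplitA, List.foldl_append]
      have h3 : L * ((m : Nat) + 1 : Nat) = L * m + L := by push_cast; ring
      rw [h3]
      exact hrun.2

theorem pv_main (people : List String) (max_distance repeats : Int) (hL : people ≠ []) :
    get_possible_mentor_combinations people max_distance repeats
      = get_possible_mentor_combinations_alt people max_distance repeats := by
  have hLpos : (0 : Int) < (people.length : Int) := by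
    have : people.length ≠ 0 := fun h => hL (List.eq_nil_of_length_eq_zero h)
    omega
  unfold get_possible_mentor_combinations get_possible_mentor_combinations_alt
  set L : Int := (people.length : Int) with hdefL
  simp only
  generalize -(PySem.Int.floordiv (-max_distance) L) = ms
  -- second-loop helper, for any starting dict with the invariant at L * ms
  have hsecond : ∀ st : PySem.Dict String (List Int) × Int, pvInv st.1 (L * ms) →
      (PySem.List.pyRange (L * ms) (L + L * ms) 1).foldl (pvAStep people max_distance) st
        = (PySem.List.enumerate people (L * ms)).foldl (pvVisit max_distance) st := by
    intro st hInv
    have hrun := pv_run people max_distance people.length (L * ms) st hInv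
    have henum : PySem.List.enumerate people (ms * L)
        = (PySem.List.pyRange (L * ms) (L * ms + L) 1).map
            (fun i => (i, PySem.List.pyGetD people (PySem.Int.mod i L) "")) := by
      have := pv_enum_block people hL ms
      rw [mul_comm ms L] at this
      rw [mul_comm ms L]
      exact this
    have hcomm : L + L * ms = L * ms + L := by ring
    rw [hcomm, hrun.1, ← henum, mul_comm ms L]
  by_cases hms : ms ≤ 0
  · -- no manual blocks at all: both first loops are empty
    have hA : PySem.List.pyRange 0 (L * ms) 1 = [] :=
      PySem.List.pyRange_one_eq_nil (by nlinarith)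
    have hB : PySem.List.pyRange 0 ms 1 = [] := PySem.List.pyRange_one_eq_nil hms
    rw [hA, hB]
    simp only [List.foldl_nil]
    rw [hsecond (PySem.Dict.empty, 0) (pvInv_empty _)]
  · -- ms > 0 manual blocks
    rw [not_le] at hms
    obtain ⟨m, rfl⟩ : ∃ m : Nat, ms = (m : Int) := ⟨ms.toNat, by omega⟩
    have hblocks := pv_blocks people hL max_distance m
    rw [← hdefL] at hblocks
    obtain ⟨hEq, hInv⟩ := hblocks
    rw [← hEq, hsecond (_, 0) hInv]

-- ===== VERDICT (by name: the statement is the Claim_ definition above) =====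
theorem get_possible_mentor_combinations_spec : Claim_equal_get_possible_mentor_combinations := by
  intro people max_distance repeats _ hPre
  unfold Spec_get_possible_mentor_combinations
  exact pv_main people max_distance repeats hPre
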